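-- pv_equiv track=rewrite | github.com/abhx31/MetaInsight | apps/backend/app/agents/risk_detector/detectors/contextual.py | _analyze_dependency_chains
-- ===== SOURCE A (Python) =====
-- from typing import List, Dict, Optional
--
-- def _analyze_dependency_chains(dependency_graph: Dict[str, List[str]]) -> List[Dict]:
--     """Analyze dependency graph for long chains and cycles."""
--     risks = []
--
--     # Detect long chains (depth > 3)
--     def get_chain_depth(task_id: str, visited: set = None) -> int:
--         if visited is None:
--             visited = set()
--         if task_id in visited:
--             return 0  # Cycle detected
--         visited.add(task_id)
--
--         deps = dependency_graph.get(task_id, [])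
--         if not deps:
--             return 1
--
--         return 1 + max(get_chain_depth(dep, visited.copy()) for dep in deps)
--
--     for task_id in dependency_graph:
--         depth = get_chain_depth(task_id)
--         if depth > 3:
--             risks.append({
--                 "type": "long_dependency_chain",
--                 "description": f"Task {task_id} has dependency chain depth of {depth} - high cascade risk",
--                 "evidence": f"Dependency chain: {task_id} -> ... ({depth} levels deep)",
--                 "category": "dependency"
--             })
--
--     # Detect cycles (circular dependencies)
--     def has_cycle(task_id: str, visited: set, rec_stack: set) -> bool:
--         visited.add(task_id)
--         rec_stack.add(task_id)
--
--         for dep in dependency_graph.get(task_id, []):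
--             if dep not in visited:
--                 if has_cycle(dep, visited, rec_stack):
--                     return True
--             elif dep in rec_stack:
--                 return True
--
--         rec_stack.remove(task_id)
--         return False
--
--     visited = set()
--     for task_id in dependency_graph:
--         if task_id not in visited:
--             if has_cycle(task_id, visited, set()):
--                 risks.append({
--                     "type": "circular_dependency",
--                     "description": f"Circular dependency detected involving {task_id}",
--                     "evidence": "Dependency cycle found in task graph",
--                     "category": "dependency"
--                 })
--                 break  # Only report once
--
--     return risks
-- ===== SOURCE B (Python) =====
-- from typing import List, Dict, Optional
--
-- def _analyze_dependency_chains(dependency_graph: Dict[str, List[str]]) -> List[Dict]: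
--     """Analyze dependency graph for long chains and cycles (iterative, explicit stacks)."""
--     risks = []
--
--     # Chain depth via an explicit-stack evaluation machine instead of recursion.
--     # Frames: (remaining sibling deps, path set for this branch, best child depth so far).
--     def chain_depth(root: str) -> int:
--         stack = []
--         node, path = root, set()
--         ret = None
--         while True:
--             if ret is None:
--                 if node in path:
--                     ret = 0
--                 else:
--                     deps = dependency_graph.get(node, [])
--                     if not deps:
--                         ret = 1
--                     else:
--                         newpath = path | {node}
--                         stack.append((deps[1:], newpath, 0))
--                         node, path = deps[0], newpath
--             else:
--                 if not stack:
--                     return ret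
--                 ds, p, best = stack.pop()
--                 best = max(best, ret)
--                 if ds:
--                     stack.append((ds[1:], p, best))
--                     node, path, ret = ds[0], p, None
--                 else:
--                     ret = 1 + best
--
--     for task_id in dependency_graph:
--         depth = chain_depth(task_id)
--         if depth > 3:
--             risks.append({
--                 "type": "long_dependency_chain",
--                 "description": f"Task {task_id} has dependency chain depth of {depth} - high cascade risk",
--                 "evidence": f"Dependency chain: {task_id} -> ... ({depth} levels deep)",
--                 "category": "dependency"
--             })
--
--     # Cycle detection via an iterative gray-stack DFS (shared visited across roots).
--     visited = set()
--
--     def find_cycle_from(root: str) -> bool: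
--         stack = [(root, dependency_graph.get(root, []))]
--         gray = set()
--         visited.add(root)
--         gray.add(root)
--         while stack:
--             v, ds = stack[-1]
--             if not ds:
--                 stack.pop()
--                 gray.discard(v)
--                 continue
--             d = ds[0]
--             stack[-1] = (v, ds[1:])
--             if d in gray:
--                 return True
--             if d in visited:
--                 continue
--             visited.add(d)
--             gray.add(d)
--             stack.append((d, dependency_graph.get(d, [])))
--         return False
--
--     for task_id in dependency_graph:
--         if task_id not in visited:
--             if find_cycle_from(task_id):
--                 risks.append({
--                     "type": "circular_dependency",
--                     "description": f"Circular dependency detected involving {task_id}",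
--                     "evidence": "Dependency cycle found in task graph",
--                     "category": "dependency"
--                 })
--                 break  # Only report once
--     return risks
-- ===== Notes on version B (the rewrite author's own statement) =====
-- stated objective: alternative
-- what changed: Both recursive DFS helpers are replaced by explicit-stack iterative traversals: chain depth by a frame-stack evaluation machine reproducing 1+max over per-branch path sets, and cycle detection by an iterative gray-stack DFS with shared visited and report-once ordering.
import Mathlib
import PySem

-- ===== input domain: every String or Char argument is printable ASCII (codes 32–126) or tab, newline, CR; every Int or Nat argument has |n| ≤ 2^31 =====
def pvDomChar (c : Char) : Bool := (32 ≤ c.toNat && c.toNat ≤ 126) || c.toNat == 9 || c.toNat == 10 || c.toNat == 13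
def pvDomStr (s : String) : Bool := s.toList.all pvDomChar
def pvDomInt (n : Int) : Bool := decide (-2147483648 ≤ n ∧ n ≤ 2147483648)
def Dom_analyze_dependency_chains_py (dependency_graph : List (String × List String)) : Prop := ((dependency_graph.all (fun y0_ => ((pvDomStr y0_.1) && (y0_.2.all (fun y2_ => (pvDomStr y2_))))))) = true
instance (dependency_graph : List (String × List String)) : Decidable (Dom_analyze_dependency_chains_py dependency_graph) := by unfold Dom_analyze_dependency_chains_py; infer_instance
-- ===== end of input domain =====

-- B replaces both recursive DFS helpers by explicit-stack iterative traversals (same values, same order of risks); same asymptotic cost.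

-- ===== PORT A =====
-- Shared context helpers: the dict, its `get(k, [])`, the finite universe of node names,
-- and the termination measure `pvFree` (number of universe nodes outside a visited set),
-- with the lemmas the `decreasing_by` proofs of the recursions below cite by name.

def pvDeps (g : PySem.Dict String (List String)) (v : String) : List String :=
  PySem.Dict.getD g v []

def pvNodes (g : PySem.Dict String (List String)) : List String :=
  PySem.Set.ofList (PySem.Dict.keys g ++ (PySem.Dict.values g).flatten)

def pvFree (g : PySem.Dict String (List String)) (S : PySem.Set String) : Nat :=
  ((pvNodes g).filter (fun x => !(PySem.Set.contains S x))).length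

theorem contains_false_iff (S : PySem.Set String) (x : String) :
    PySem.Set.contains S x = false ↔ x ∉ S := by
  rw [← PySem.Set.contains_iff]
  cases PySem.Set.contains S x <;> simp

theorem contains_true_iff (S : PySem.Set String) (x : String) :
    PySem.Set.contains S x = true ↔ x ∈ S := PySem.Set.contains_iff _ _

theorem pvDeps_ne_nil_mem (g : PySem.Dict String (List String)) (v : String)
    (h : pvDeps g v ≠ []) : v ∈ pvNodes g := by
  have hc : PySem.Dict.get? g v ≠ none := by
    intro hnone
    exact h (by simp [pvDeps, PySem.Dict.getD_eq_get?_getD, hnone])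
  have hk : v ∈ PySem.Dict.keys g := by
    by_contra hnk
    exact hc ((PySem.Dict.get?_eq_none_iff_not_mem_keys (d := g) (k := v)).mpr hnk)
  simp only [pvNodes, PySem.Set.mem_ofList, List.mem_append]
  exact Or.inl hk

theorem pvDeps_mem_nodes (g : PySem.Dict String (List String)) (v d : String)
    (hd : d ∈ pvDeps g v) : d ∈ pvNodes g := by
  have hne : pvDeps g v ≠ [] := by intro h; rw [h] at hd; exact absurd hd (List.not_mem_nil)
  have hsome : PySem.Dict.get? g v = some (pvDeps g v) := by
    rcases hg : PySem.Dict.get? g v with _ | ds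
    · exact absurd (by simp [pvDeps, PySem.Dict.getD_eq_get?_getD, hg]) hne
    · simp [pvDeps, PySem.Dict.getD_eq_get?_getD, hg]
  have hitems : (v, pvDeps g v) ∈ PySem.Dict.items g :=
    PySem.Dict.mem_items_of_get?_eq_some (d := g) hsome
  have hval : pvDeps g v ∈ PySem.Dict.values g := by
    simp only [PySem.Dict.values, List.mem_map]
    exact ⟨(v, pvDeps g v), hitems, rfl⟩
  simp only [pvNodes, PySem.Set.mem_ofList, List.mem_append]
  exact Or.inr (List.mem_flatten.mpr ⟨pvDeps g v, hval, hd⟩)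

theorem pvFree_add_lt (g : PySem.Dict String (List String)) (S : PySem.Set String) (v : String)
    (hv : PySem.Set.contains S v = false) (hU : v ∈ pvNodes g) :
    pvFree g (PySem.Set.add S v) < pvFree g S := by
  unfold pvFree
  have hsub : ((pvNodes g).filter (fun x => !(PySem.Set.contains (PySem.Set.add S v) x))).Sublist
      (((pvNodes g).filter (fun x => !(PySem.Set.contains S x))).filter (fun x => !(x = v))) := by
    rw [List.filter_filter]
    apply List.monotone_filter_right
    intro x hx
    simp only [Bool.not_eq_eq_eq_not, Bool.not_true] at hx
    rw [contains_false_iff] at hx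
    have hxv : x ≠ v := by rintro rfl; exact hx ((PySem.Set.mem_add S x x).mpr (Or.inr rfl))
    have hxS : PySem.Set.contains S x = false := by
      rw [contains_false_iff]; intro hm; exact hx ((PySem.Set.mem_add S v x).mpr (Or.inl hm))
    simp [hxv]
    exact (contains_false_iff S x).mp hxS
  calc ((pvNodes g).filter (fun x => !(PySem.Set.contains (PySem.Set.add S v) x))).length
      ≤ (((pvNodes g).filter (fun x => !(PySem.Set.contains S x))).filter (fun x => !(x = v))).length := hsub.length_le
    _ < ((pvNodes g).filter (fun x => !(PySem.Set.contains S x))).length := by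
        rw [List.length_filter_lt_length_iff_exists]
        refine ⟨v, ?_, by simp⟩
        rw [List.mem_filter]
        exact ⟨hU, by simp; exact (contains_false_iff S v).mp hv⟩

theorem pvFree_add_eq_of_not_mem (g : PySem.Dict String (List String)) (S : PySem.Set String)
    (v : String) (hU : v ∉ pvNodes g) :
    pvFree g (PySem.Set.add S v) = pvFree g S := by
  unfold pvFree
  congr 1
  apply List.filter_congr
  intro x hx
  have hxv : x ≠ v := by rintro rfl; exact hU hx
  by_cases hxS : x ∈ S
  · have h1 : PySem.Set.contains (PySem.Set.add S v) x = true := by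
      rw [contains_true_iff]; exact (PySem.Set.mem_add S v x).mpr (Or.inl hxS)
    have h2 : PySem.Set.contains S x = true := by rw [contains_true_iff]; exact hxS
    rw [h1, h2]
  · have h1 : PySem.Set.contains (PySem.Set.add S v) x = false := by
      rw [contains_false_iff]; intro hm
      rcases (PySem.Set.mem_add S v x).mp hm with h | h
      · exact hxS h
      · exact hxv h
    have h2 : PySem.Set.contains S x = false := by rw [contains_false_iff]; exact hxS
    rw [h1, h2]

-- A's recursive `get_chain_depth` (per-branch copies of `visited`); `max(...)` over a
-- nonempty generator is `pvMaxList` (first element seeds the fold).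
def pvMaxList : List Int → Int
  | [] => 0
  | x :: xs => xs.foldl max x

def depthA (g : PySem.Dict String (List String)) (v : String) (S : PySem.Set String) : Int :=
  if PySem.Set.contains S v then 0
  else
    match h : pvDeps g v with
    | [] => 1
    | d0 :: rest =>
      1 + pvMaxList ((d0 :: rest).attach.map (fun d => depthA g d.1 (PySem.Set.add S v)))
termination_by pvFree g S + (if PySem.Set.contains S v then 0 else if v ∈ pvNodes g then 0 else 1)
decreasing_by
  have hvU : v ∈ pvNodes g := pvDeps_ne_nil_mem g v (by rw [h]; simp)
  have hdU : d.1 ∈ pvNodes g := pvDeps_mem_nodes g v d.1 (by rw [h]; exact d.2)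
  have hlt := pvFree_add_lt g S v (by simpa using ‹¬ PySem.Set.contains S v = true›) hvU
  split_ifs <;> omega

-- ===== PORT B =====
-- `costF` is a termination measure for B's machine (the size of A's recursion tree);
-- it is proof plumbing, not part of either algorithm.
def costF (g : PySem.Dict String (List String)) (v : String) (S : PySem.Set String) : Nat :=
  if PySem.Set.contains S v then 1
  else
    match h : pvDeps g v with
    | [] => 1
    | d0 :: rest =>
      1 + ((d0 :: rest).attach.map (fun d => 1 + costF g d.1 (PySem.Set.add S v))).sum
termination_by pvFree g S + (if PySem.Set.contains S v then 0 else if v ∈ pvNodes g then 0 else 1)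
decreasing_by
  have hvU : v ∈ pvNodes g := pvDeps_ne_nil_mem g v (by rw [h]; simp)
  have hdU : d.1 ∈ pvNodes g := pvDeps_mem_nodes g v d.1 (by rw [h]; exact d.2)
  have hlt := pvFree_add_lt g S v (by simpa using ‹¬ PySem.Set.contains S v = true›) hvU
  split_ifs <;> omega

theorem costF_pos (g : PySem.Dict String (List String)) (v : String) (S : PySem.Set String) :
    1 ≤ costF g v S := by
  rw [costF]
  split_ifs
  · omega
  · split <;> omega

theorem costF_cons (g : PySem.Dict String (List String)) (v d : String) (S : PySem.Set String)
    (rest : List String) (hv : PySem.Set.contains S v = false) (h : pvDeps g v = d :: rest) :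
    costF g v S = 1 + ((1 + costF g d (PySem.Set.add S v)) +
      (rest.map (fun x => 1 + costF g x (PySem.Set.add S v))).sum) := by
  rw [costF]
  rw [hv]
  simp only [Bool.false_eq_true, if_false]
  split
  · next heq => rw [h] at heq; exact absurd heq (by simp)
  · next d0 rest0 heq =>
      rw [h] at heq
      obtain ⟨rfl, rfl⟩ : d0 = d ∧ rest0 = rest := by
        have := (List.cons.injEq d0 rest0 d rest).mp heq.symm
        exact ⟨this.1, this.2⟩
      simp only [List.map_subtype, List.unattach_attach, List.map_cons, List.sum_cons]

def pvCtrlCost (g : PySem.Dict String (List String)) :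
    Sum (String × PySem.Set String) Int → Nat
  | Sum.inl (v, S) => costF g v S
  | Sum.inr _ => 0

def pvStackCost (g : PySem.Dict String (List String))
    (st : List (List String × PySem.Set String × Int)) : Nat :=
  (st.map (fun fr => 1 + (fr.1.map (fun d => 1 + costF g d fr.2.1)).sum)).sum

-- B's iterative chain-depth machine: control is either "evaluate node v with path S"
-- (inl) or "a value r was just produced" (inr); frames hold (remaining sibling deps,
-- the branch's path set, best child depth so far).
def runDepth (g : PySem.Dict String (List String)) :
    Sum (String × PySem.Set String) Int →
    List (List String × PySem.Set String × Int) → Int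
  | Sum.inl (v, S), st =>
    if PySem.Set.contains S v then runDepth g (Sum.inr 0) st
    else
      match h : pvDeps g v with
      | [] => runDepth g (Sum.inr 1) st
      | d :: rest =>
        runDepth g (Sum.inl (d, PySem.Set.add S v)) ((rest, PySem.Set.add S v, 0) :: st)
  | Sum.inr r, [] => r
  | Sum.inr r, (ds, p, best) :: st =>
    match ds with
    | [] => runDepth g (Sum.inr (1 + max best r)) st
    | d :: rest => runDepth g (Sum.inl (d, p)) ((rest, p, max best r) :: st)
termination_by c st => pvCtrlCost g c + pvStackCost g st
decreasing_by
  · have := costF_pos g v S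
    simp only [pvCtrlCost]; omega
  · have := costF_pos g v S
    simp only [pvCtrlCost]; omega
  · have hc := costF_cons g v d S rest (by simpa using ‹¬ PySem.Set.contains S v = true›) h
    simp only [pvCtrlCost, pvStackCost, List.map_cons, List.sum_cons, hc]; omega
  · simp only [pvCtrlCost, pvStackCost, List.map_cons, List.sum_cons, List.map_nil, List.sum_nil]; omega
  · simp only [pvCtrlCost, pvStackCost, List.map_cons, List.sum_cons]; omega

-- ===== PORT A (cycle half) =====
-- A's recursive `has_cycle` with its shared `visited`; the mutated `rec_stack` is
-- net-unchanged whenever a call returns False, so it is passed immutably (on a True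
-- return Python's rec_stack is discarded by every caller, so it is not returned).
-- The dep loop ("for dep in ...: ... return True ...") is the mutual `goA`.
-- `fuel` is only a totality guard: each nested call strictly grows `visited` inside
-- the finite `pvNodes g`, so `pvNodes g length + 2` can never be exhausted.
mutual
def hcF (g : PySem.Dict String (List String)) :
    Nat → String → PySem.Set String → PySem.Set String → Bool × PySem.Set String
  | 0, _, vis, _ => (false, vis)
  | f+1, v, vis, gray => goA g f (pvDeps g v) (PySem.Set.add vis v) (PySem.Set.add gray v)
termination_by f _ _ _ => (f, 0)

def goA (g : PySem.Dict String (List String)) :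
    Nat → List String → PySem.Set String → PySem.Set String → Bool × PySem.Set String
  | _, [], vis, _ => (false, vis)
  | f, d :: dt, vis, gray =>
    if !(PySem.Set.contains vis d) then
      match hcF g f d vis gray with
      | (true, vis') => (true, vis')
      | (false, vis') => goA g f dt vis' gray
    else if PySem.Set.contains gray d then (true, vis)
    else goA g f dt vis gray
termination_by f ds _ _ => (f, ds.length)
end

def fuelA (g : PySem.Dict String (List String)) : Nat := (pvNodes g).length + 2

def riskChainA (k : String) (depth : Int) : List (String × String) :=
  [("type", "long_dependency_chain"),
   ("description", "Task " ++ k ++ " has dependency chain depth of " ++ PySem.Int.toStr depth ++ " - high cascade risk"),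
   ("evidence", "Dependency chain: " ++ k ++ " -> ... (" ++ PySem.Int.toStr depth ++ " levels deep)"),
   ("category", "dependency")]

def riskCycleA (k : String) : List (String × String) :=
  [("type", "circular_dependency"),
   ("description", "Circular dependency detected involving " ++ k),
   ("evidence", "Dependency cycle found in task graph"),
   ("category", "dependency")]

-- the `for task_id in dependency_graph: if task_id not in visited: if has_cycle(...): ...; break` loop
def cycleLoopA (g : PySem.Dict String (List String)) :
    List String → PySem.Set String → Option String
  | [], _ => none
  | k :: kt, vis =>
    if PySem.Set.contains vis k then cycleLoopA g kt vis
    else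
      match hcF g (fuelA g) k vis PySem.Set.empty with
      | (true, _) => some k
      | (false, vis') => cycleLoopA g kt vis'

def analyze_dependency_chains_py (dependency_graph : List (String × List String)) :
    List (List (String × String)) :=
  let g := PySem.Dict.ofList dependency_graph
  let risks := (PySem.Dict.keys g).foldl (fun acc k =>
      let depth := depthA g k PySem.Set.empty
      if depth > 3 then acc ++ [riskChainA k depth] else acc) []
  match cycleLoopA g (PySem.Dict.keys g) PySem.Set.empty with
  | some k => risks ++ [riskCycleA k]
  | none => risks

-- ===== PORT B (cycle half and assembly) =====
-- B's iterative gray-stack DFS: frames are (node, its remaining deps); shared `vis`,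
-- per-root `gray` (the frames currently on the stack).
def runC (g : PySem.Dict String (List String)) :
    List (String × List String) → PySem.Set String → PySem.Set String →
    Bool × PySem.Set String
  | [], vis, _ => (false, vis)
  | (v, []) :: st, vis, gray => runC g st vis (PySem.Set.discard gray v)
  | (v, d :: ds) :: st, vis, gray =>
    if PySem.Set.contains gray d then (true, vis)
    else if PySem.Set.contains vis d then runC g ((v, ds) :: st) vis gray
    else runC g ((d, pvDeps g d) :: (v, ds) :: st)
           (PySem.Set.add vis d) (PySem.Set.add gray d)
termination_by st vis _ => (pvFree g vis, (st.map (fun fr => fr.2.length)).sum, st.length)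
decreasing_by
  · simp only [List.map_cons, List.sum_cons, List.length_nil, List.length_cons, Nat.zero_add]
    exact Prod.Lex.right _ (Prod.Lex.right _ (by omega))
  · simp only [List.map_cons, List.sum_cons, List.length_cons]
    exact Prod.Lex.right _ (Prod.Lex.left _ _ (by omega))
  · by_cases hdU : d ∈ pvNodes g
    · exact Prod.Lex.left _ _ (pvFree_add_lt g vis d (by simpa using ‹¬ PySem.Set.contains vis d = true›) hdU)
    · have hfree := pvFree_add_eq_of_not_mem g vis d hdU
      have hnil : pvDeps g d = [] := by
        by_contra hne
        exact hdU (pvDeps_ne_nil_mem g d hne)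
      rw [hfree, hnil]
      simp only [List.map_cons, List.sum_cons, List.length_nil, List.length_cons, Nat.zero_add]
      exact Prod.Lex.right _ (Prod.Lex.left _ _ (by omega))

def riskChainB (k : String) (depth : Int) : List (String × String) :=
  [("type", "long_dependency_chain"),
   ("description", "Task " ++ k ++ " has dependency chain depth of " ++ PySem.Int.toStr depth ++ " - high cascade risk"),
   ("evidence", "Dependency chain: " ++ k ++ " -> ... (" ++ PySem.Int.toStr depth ++ " levels deep)"),
   ("category", "dependency")]

def riskCycleB (k : String) : List (String × String) :=
  [("type", "circular_dependency"),
   ("description", "Circular dependency detected involving " ++ k),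
   ("evidence", "Dependency cycle found in task graph"),
   ("category", "dependency")]

def cycleLoopB (g : PySem.Dict String (List String)) :
    List String → PySem.Set String → Option String
  | [], _ => none
  | k :: kt, vis =>
    if PySem.Set.contains vis k then cycleLoopB g kt vis
    else
      let res := runC g [(k, pvDeps g k)] (PySem.Set.add vis k) (PySem.Set.add PySem.Set.empty k)
      if res.1 then some k else cycleLoopB g kt res.2

def analyze_dependency_chains_py_alt (dependency_graph : List (String × List String)) :
    List (List (String × String)) :=
  let g := PySem.Dict.ofList dependency_graph
  let risks := (PySem.Dict.keys g).foldl (fun acc k =>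
      let depth := runDepth g (Sum.inl (k, PySem.Set.empty)) []
      if depth > 3 then acc ++ [riskChainB k depth] else acc) []
  match cycleLoopB g (PySem.Dict.keys g) PySem.Set.empty with
  | some k => risks ++ [riskCycleB k]
  | none => risks

-- ===== PRECONDITION & SPEC =====
def Spec_analyze_dependency_chains_py (dependency_graph : List (String × List String)) (out : List (List (String × String))) : Prop := out = analyze_dependency_chains_py_alt dependency_graph
instance (dependency_graph : List (String × List String)) (out : List (List (String × String))) : Decidable (Spec_analyze_dependency_chains_py dependency_graph out) := by unfold Spec_analyze_dependency_chains_py; infer_instance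

-- ===== CLAIM (what is proved, stated in full; the proofs are below) =====
def Claim_equal_analyze_dependency_chains_py : Prop := ∀ (dependency_graph : List (String × List String)), Dom_analyze_dependency_chains_py dependency_graph → Spec_analyze_dependency_chains_py dependency_graph (analyze_dependency_chains_py dependency_graph)

-- ===== LEMMAS AND PROOFS =====

theorem depthA_of_mem (g : PySem.Dict String (List String)) (v : String) (S : PySem.Set String)
    (h : PySem.Set.contains S v = true) : depthA g v S = 0 := by
  rw [depthA, h]; simp

theorem depthA_of_nil (g : PySem.Dict String (List String)) (v : String) (S : PySem.Set String)
    (hv : PySem.Set.contains S v = false) (h : pvDeps g v = []) : depthA g v S = 1 := by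
  rw [depthA, hv]
  simp only [Bool.false_eq_true, if_false]
  split
  · rfl
  · next d0 rest0 heq => rw [h] at heq; exact absurd heq (by simp)

theorem depthA_of_cons (g : PySem.Dict String (List String)) (v d : String)
    (S : PySem.Set String) (rest : List String)
    (hv : PySem.Set.contains S v = false) (h : pvDeps g v = d :: rest) :
    depthA g v S = 1 + List.foldl max (depthA g d (PySem.Set.add S v))
      (rest.map (fun x => depthA g x (PySem.Set.add S v))) := by
  rw [depthA, hv]
  simp only [Bool.false_eq_true, if_false]
  split
  · next heq => rw [h] at heq; exact absurd heq (by simp)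
  · next d0 rest0 heq =>
      rw [h] at heq
      obtain ⟨rfl, rfl⟩ : d0 = d ∧ rest0 = rest := by
        have := (List.cons.injEq d0 rest0 d rest).mp heq.symm
        exact ⟨this.1, this.2⟩
      simp only [List.map_subtype, List.unattach_attach, List.map_cons, pvMaxList]

theorem depthA_nonneg (g : PySem.Dict String (List String)) (v : String) (S : PySem.Set String) :
    0 ≤ depthA g v S := by
  rcases hv : PySem.Set.contains S v with _ | _
  · rcases h : pvDeps g v with _ | ⟨d, rest⟩
    · rw [depthA_of_nil g v S hv h]; omega
    · rw [depthA_of_cons g v d S rest hv h]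
      have hle := (PySem.List.le_foldl_max (rest.map (fun x => depthA g x (PySem.Set.add S v)))
        (depthA g d (PySem.Set.add S v))).1
      have hd : (0:Int) ≤ depthA g d (PySem.Set.add S v) := depthA_nonneg g d (PySem.Set.add S v)
      omega
  · rw [depthA_of_mem g v S hv]
termination_by pvFree g S + (if PySem.Set.contains S v then 0 else if v ∈ pvNodes g then 0 else 1)
decreasing_by
  have hvU : v ∈ pvNodes g := pvDeps_ne_nil_mem g v (by rw [h]; simp)
  have hdU : d ∈ pvNodes g := pvDeps_mem_nodes g v d (by rw [h]; simp)
  have hlt := pvFree_add_lt g S v hv hvU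
  split_ifs <;> omega

-- frame lemma: returning r into a frame (rest, S', b) finishes as 1 + max over all siblings
theorem runDepth_frame (g : PySem.Dict String (List String)) (S' : PySem.Set String)
    (rest : List String) (b r : Int) (st : List (List String × PySem.Set String × Int))
    (H : ∀ x ∈ rest, ∀ st', runDepth g (Sum.inl (x, S')) st' = runDepth g (Sum.inr (depthA g x S')) st') :
    runDepth g (Sum.inr r) ((rest, S', b) :: st) =
      runDepth g (Sum.inr (1 + List.foldl max (max b r) (rest.map (fun x => depthA g x S')))) st := by
  induction rest generalizing b r with
  | nil => rw [runDepth]; simp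
  | cons x rest' ih =>
      rw [runDepth]
      rw [H x (List.mem_cons_self) ((rest', S', max b r) :: st)]
      rw [ih (max b r) (depthA g x S') (H := fun y hy st' => H y (List.mem_cons_of_mem x hy) st')]
      simp only [List.map_cons, List.foldl_cons]

-- the machine computes A's recursive depth
theorem runDepth_eq_depthA (g : PySem.Dict String (List String)) (v : String)
    (S : PySem.Set String) (st : List (List String × PySem.Set String × Int)) :
    runDepth g (Sum.inl (v, S)) st = runDepth g (Sum.inr (depthA g v S)) st := by
  suffices Hmain : ∀ n (v : String) (S : PySem.Set String) st, costF g v S ≤ n →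
      runDepth g (Sum.inl (v, S)) st = runDepth g (Sum.inr (depthA g v S)) st by
    exact Hmain (costF g v S) v S st le_rfl
  intro n
  induction n using Nat.strong_induction_on with
  | _ n IH =>
    intro v S st hc
    rcases hv : PySem.Set.contains S v with _ | _
    · rcases h : pvDeps g v with _ | ⟨d, rest⟩
      · rw [runDepth, hv, h, depthA_of_nil g v S hv h]
        simp
      · have hcons := costF_cons g v d S rest hv h
        have hsum_nonneg : ∀ x ∈ rest, (0:ℕ) ≤ 1 + costF g x (PySem.Set.add S v) := by
          intro x _; omega
        have hstep : ∀ x ∈ d :: rest, costF g x (PySem.Set.add S v) < costF g v S := by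
          intro x hx
          rcases List.mem_cons.mp hx with rfl | hx'
          · omega
          · have : 1 + costF g x (PySem.Set.add S v) ≤
                (rest.map (fun y => 1 + costF g y (PySem.Set.add S v))).sum :=
              List.single_le_sum (fun b _ => Nat.zero_le b) _ (List.mem_map_of_mem hx')
            omega
        have hH : ∀ x ∈ rest, ∀ st', runDepth g (Sum.inl (x, PySem.Set.add S v)) st' =
            runDepth g (Sum.inr (depthA g x (PySem.Set.add S v))) st' := by
          intro x hx st'
          exact IH (costF g x (PySem.Set.add S v))
            (lt_of_lt_of_le (hstep x (List.mem_cons_of_mem d hx)) hc) x _ st' le_rfl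
        rw [runDepth, hv, h]
        simp only [Bool.false_eq_true, if_false]
        rw [IH (costF g d (PySem.Set.add S v))
            (lt_of_lt_of_le (hstep d List.mem_cons_self) hc) d _ _ le_rfl]
        rw [runDepth_frame g (PySem.Set.add S v) rest 0 (depthA g d (PySem.Set.add S v)) st hH]
        rw [max_eq_right (depthA_nonneg g d (PySem.Set.add S v))]
        rw [depthA_of_cons g v d S rest hv h]
    · rw [runDepth, hv, depthA_of_mem g v S hv]
      simp

theorem chainDepthB_eq (g : PySem.Dict String (List String)) (k : String) :
    runDepth g (Sum.inl (k, PySem.Set.empty)) [] = depthA g k PySem.Set.empty := by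
  rw [runDepth_eq_depthA]
  rw [runDepth]

theorem pvFree_mono (g : PySem.Dict String (List String)) (S T : PySem.Set String)
    (h : ∀ x ∈ S, x ∈ T) : pvFree g T ≤ pvFree g S := by
  apply List.Sublist.length_le
  apply List.monotone_filter_right
  intro x hx
  simp only [Bool.not_eq_eq_eq_not, Bool.not_true] at hx ⊢
  rw [contains_false_iff] at hx ⊢
  intro hmem
  exact hx (h x hmem)

theorem pvFree_le_len (g : PySem.Dict String (List String)) (S : PySem.Set String) :
    pvFree g S ≤ (pvNodes g).length :=
  List.length_filter_le _ _

theorem discard_add_self (s : PySem.Set String) (v : String) (h : v ∉ s) :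
    PySem.Set.discard (PySem.Set.add s v) v = s := by
  rw [PySem.Set.add_of_not_mem h]
  unfold PySem.Set.discard
  simp only [List.filter_append, BEq.rfl, Bool.not_true, Bool.false_eq_true, not_false_eq_true,
    List.filter_cons_of_neg, List.filter_nil, List.append_nil, List.filter_eq_self,
    Bool.not_eq_eq_eq_not, beq_eq_false_iff_ne, ne_eq]
  intro a ha
  rintro rfl
  exact h ha

-- visited only grows through has_cycle / its dep loop
mutual
theorem hcF_mono (g : PySem.Dict String (List String)) (f : Nat) (v : String)
    (vis gray : PySem.Set String) : ∀ x ∈ vis, x ∈ (hcF g f v vis gray).2 := by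
  intro x hx
  match f with
  | 0 => rw [hcF]; exact hx
  | f'+1 =>
      rw [hcF]
      exact goA_mono g f' (pvDeps g v) (PySem.Set.add vis v) (PySem.Set.add gray v) x
        ((PySem.Set.mem_add vis v x).mpr (Or.inl hx))
termination_by (f, 0)

theorem goA_mono (g : PySem.Dict String (List String)) (f : Nat) (ds : List String)
    (vis gray : PySem.Set String) : ∀ x ∈ vis, x ∈ (goA g f ds vis gray).2 := by
  intro x hx
  match ds with
  | [] => rw [goA]; exact hx
  | d :: dt =>
      rw [goA]
      rcases hvd : PySem.Set.contains vis d with _ | _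
      · simp only [Bool.not_false, if_true]
        rcases hhc : hcF g f d vis gray with ⟨b, vis'⟩
        have hx' : x ∈ vis' := by
          have := hcF_mono g f d vis gray x hx
          rw [hhc] at this
          exact this
        cases b
        · exact goA_mono g f dt vis' gray x hx'
        · exact hx'
      · simp only [Bool.not_true, Bool.false_eq_true, if_false]
        rcases PySem.Set.contains gray d with _ | _
        · simp only [Bool.false_eq_true, if_false]
          exact goA_mono g f dt vis gray x hx
        · exact hx
termination_by (f, ds.length)
end

-- simulation: the gray-stack machine agrees with A's recursive has_cycle
theorem runC_sim (g : PySem.Dict String (List String)) (n : Nat) :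
    ∀ (v : String) (vis gray : PySem.Set String) (st : List (String × List String)) (f : Nat),
      pvFree g vis ≤ n → PySem.Set.contains vis v = false → v ∈ pvNodes g →
      v ∉ gray → (∀ x ∈ gray, x ∈ vis) → pvFree g vis + 1 ≤ f →
      ((hcF g f v vis gray).1 = true →
        (runC g ((v, pvDeps g v) :: st) (PySem.Set.add vis v) (PySem.Set.add gray v)).1 = true) ∧
      (∀ vis', hcF g f v vis gray = (false, vis') →
        runC g ((v, pvDeps g v) :: st) (PySem.Set.add vis v) (PySem.Set.add gray v) =
          runC g st vis' gray) := by
  induction n using Nat.strong_induction_on with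
  | _ n SIH =>
    intro v vis gray st f hn hv hvU hvg hgv hf
    obtain ⟨f', rfl⟩ : ∃ f', f = f' + 1 := ⟨f - 1, by omega⟩
    rw [hcF]
    have hvnm : v ∉ vis := (contains_false_iff vis v).mp hv
    have hfree_lt : pvFree g (PySem.Set.add vis v) < pvFree g vis := pvFree_add_lt g vis v hv hvU
    -- the dep loop vs the top stack frame, generalizing over the evolving visited set
    have goSim : ∀ (ds : List String) (vis2 : PySem.Set String),
        (∀ d ∈ ds, d ∈ pvNodes g) →
        (∀ x ∈ PySem.Set.add vis v, x ∈ vis2) →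
        ((goA g f' ds vis2 (PySem.Set.add gray v)).1 = true →
          (runC g ((v, ds) :: st) vis2 (PySem.Set.add gray v)).1 = true) ∧
        (∀ vis3, goA g f' ds vis2 (PySem.Set.add gray v) = (false, vis3) →
          runC g ((v, ds) :: st) vis2 (PySem.Set.add gray v) =
            runC g st vis3 (PySem.Set.discard (PySem.Set.add gray v) v)) := by
      intro ds
      induction ds with
      | nil =>
          intro vis2 _ _
          constructor
          · intro habs; rw [goA] at habs; exact absurd habs (by simp)
          · intro vis3 hfalse
            rw [goA] at hfalse
            obtain rfl : vis2 = vis3 := congrArg Prod.snd hfalse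
            rw [runC]
      | cons d dt ih =>
          intro vis2 hds hvis2
          have hdU : d ∈ pvNodes g := hds d List.mem_cons_self
          have hdt : ∀ x ∈ dt, x ∈ pvNodes g := fun x hx => hds x (List.mem_cons_of_mem d hx)
          have hgsub : ∀ x ∈ PySem.Set.add gray v, x ∈ vis2 := by
            intro x hx
            rcases (PySem.Set.mem_add gray v x).mp hx with h | hxv
            · exact hvis2 x ((PySem.Set.mem_add vis v x).mpr (Or.inl (hgv x h)))
            · exact hvis2 x ((PySem.Set.mem_add vis v x).mpr (Or.inr hxv))
          have hfree2 : pvFree g vis2 ≤ pvFree g (PySem.Set.add vis v) := pvFree_mono g _ _ hvis2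
          rcases hgd : PySem.Set.contains (PySem.Set.add gray v) d with _ | _
          · -- d not gray
            rcases hvd : PySem.Set.contains vis2 d with _ | _
            · -- d not visited: A recurses, B pushes
              have hsim := SIH (pvFree g vis2) (by omega) d vis2 (PySem.Set.add gray v)
                ((v, dt) :: st) f' le_rfl hvd hdU
                ((contains_false_iff _ d).mp hgd)
                hgsub (by omega)
              rw [goA]
              simp only [hvd, Bool.not_false, if_true]
              rw [runC]
              simp only [hgd, Bool.false_eq_true, if_false, hvd]
              rcases hhc : hcF g f' d vis2 (PySem.Set.add gray v) with ⟨b, vis'⟩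
              cases b
              · -- inner call found nothing
                have hpush := hsim.2 vis' hhc
                rw [hpush]
                have hvis2' : ∀ x ∈ PySem.Set.add vis v, x ∈ vis' := by
                  intro x hx
                  have := hcF_mono g f' d vis2 (PySem.Set.add gray v) x (hvis2 x hx)
                  rw [hhc] at this
                  exact this
                exact ih vis' hdt hvis2'
              · -- inner call found a cycle
                have hpt := hsim.1 (by rw [hhc])
                constructor
                · intro _; exact hpt
                · intro vis3 habs; exact absurd habs (by simp)
            · -- d visited, not gray: both skip
              rw [goA]
              simp only [hvd, Bool.not_true, Bool.false_eq_true, if_false, hgd]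
              rw [runC]
              simp only [hgd, Bool.false_eq_true, if_false, hvd, if_true]
              exact ih vis2 hdt hvis2
          · -- d gray: both report a cycle
            have hdv : PySem.Set.contains vis2 d = true := by
              rw [contains_true_iff]
              exact hgsub d ((contains_true_iff _ d).mp hgd)
            rw [goA]
            simp only [hdv, Bool.not_true, Bool.false_eq_true, if_false, hgd, if_true]
            rw [runC]
            simp only [hgd, if_true]
            constructor
            · intro _; simp
            · intro vis3 habs; exact absurd habs (by simp)
    exact goSim (pvDeps g v) (PySem.Set.add vis v) (fun d hd => pvDeps_mem_nodes g v d hd)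
      (fun x hx => hx) |>.imp id
      (fun h2 vis' hfalse => by
        have := h2 vis' hfalse
        rw [discard_add_self gray v hvg] at this
        exact this)

theorem cycleLoop_eq (g : PySem.Dict String (List String)) (ks : List String)
    (vis : PySem.Set String) (hks : ∀ k ∈ ks, k ∈ pvNodes g) :
    cycleLoopA g ks vis = cycleLoopB g ks vis := by
  induction ks generalizing vis with
  | nil => rfl
  | cons k kt ih =>
      have hkU : k ∈ pvNodes g := hks k List.mem_cons_self
      have hkt : ∀ x ∈ kt, x ∈ pvNodes g := fun x hx => hks x (List.mem_cons_of_mem k hx)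
      rw [cycleLoopA, cycleLoopB]
      rcases hvk : PySem.Set.contains vis k with _ | _
      · -- k not yet visited
        simp only [Bool.false_eq_true, if_false]
        have hsim := runC_sim g (pvFree g vis) k vis PySem.Set.empty [] (fuelA g)
          le_rfl hvk hkU (by simp [PySem.Set.empty]) (by simp [PySem.Set.empty])
          (by have := pvFree_le_len g vis; unfold fuelA; omega)
        rcases hhc : hcF g (fuelA g) k vis PySem.Set.empty with ⟨b, vis'⟩
        cases b
        · -- no cycle from k: both continue with the updated visited set
          have hrun := hsim.2 vis' hhc
          rw [runC] at hrun
          rw [hrun]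
          simp only [Bool.false_eq_true, if_false]
          exact ih vis' hkt
        · -- cycle found from k
          have htrue := hsim.1 (by rw [hhc])
          rw [htrue]
          simp
      · simp only [if_true]
        exact ih vis hkt

theorem riskChainB_eq : riskChainB = riskChainA := rfl
theorem riskCycleB_eq : riskCycleB = riskCycleA := rfl

theorem keys_sub_nodes (g : PySem.Dict String (List String)) :
    ∀ k ∈ PySem.Dict.keys g, k ∈ pvNodes g := by
  intro k hk
  simp only [pvNodes, PySem.Set.mem_ofList, List.mem_append]
  exact Or.inl hk

-- ===== VERDICT (by name: the statement is the Claim_ definition above) =====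
theorem analyze_dependency_chains_py_spec : Claim_equal_analyze_dependency_chains_py := by
  intro dg _
  unfold Spec_analyze_dependency_chains_py
  simp only [analyze_dependency_chains_py, analyze_dependency_chains_py_alt,
    chainDepthB_eq, riskChainB_eq, riskCycleB_eq]
  rw [cycleLoop_eq (PySem.Dict.ofList dg) (PySem.Dict.keys (PySem.Dict.ofList dg))
      PySem.Set.empty (keys_sub_nodes _)]
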